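-- pv_equiv track=rewrite | github.com/pabloschwarzenberg/grader | hito2_ej2/hito2_ej2_0ba6ba3f51b6aac2d18e3b7c10045b96.py | secuenciaADN
-- ===== SOURCE A (Python) =====
-- def secuenciaADN(secuencia):
--     ADN=[]
--     for i in ["A","C","G","T"]:
--         for j in ["A","C","G","T"]:
--             for k in ["A","C","G","T"]:
--                 ADN.append(i+j+k)
--     if secuencia in ADN:
--         return "correcta"
--     elif secuencia not in ADN:
--         return "Incorrecta"
-- ===== SOURCE B (Python) =====
-- def secuenciaADN(secuencia):
--     if len(secuencia) == 3 and all(c in "ACGT" for c in secuencia):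
--         return "correcta"
--     return "Incorrecta"
-- ===== Notes on version B (the rewrite author's own statement) =====
-- stated objective: simpler
-- what changed: B drops the triple-nested generation of all 64 codons and tests the defining property directly: length 3 and every character in 'ACGT'.
import Mathlib
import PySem

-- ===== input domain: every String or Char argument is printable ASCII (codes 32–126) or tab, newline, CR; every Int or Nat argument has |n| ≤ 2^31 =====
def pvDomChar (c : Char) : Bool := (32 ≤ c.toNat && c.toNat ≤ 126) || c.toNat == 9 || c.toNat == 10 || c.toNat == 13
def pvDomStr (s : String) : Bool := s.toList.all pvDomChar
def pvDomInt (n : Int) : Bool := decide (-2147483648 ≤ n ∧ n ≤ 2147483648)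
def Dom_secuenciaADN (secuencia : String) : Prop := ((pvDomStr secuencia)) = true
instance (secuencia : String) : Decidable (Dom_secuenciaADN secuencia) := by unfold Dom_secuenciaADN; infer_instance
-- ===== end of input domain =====

-- B replaces A's triple-nested construction of all 64 codons by a direct test
-- (length 3 and every character in "ACGT"); objective: simpler.

-- ===== PORT A =====
-- strings are represented as List Char (PySem convention: Lean's String.append is
-- opaque to the kernel); the nested for-loops appending i+j+k become nested foldl.
def secuenciaADN (secuencia : String) : String :=
  let letras : List (List Char) := [['A'], ['C'], ['G'], ['T']]
  let ADN : List (List Char) :=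
    letras.foldl (fun acc i =>
      letras.foldl (fun acc j =>
        letras.foldl (fun acc k => acc ++ [i ++ j ++ k]) acc) acc) []
  if secuencia.toList ∈ ADN then "correcta"
  else if secuencia.toList ∉ ADN then "Incorrecta"
  else ""  -- unreachable: the two conditions are complementary (Python falls off with None here, never reached)

-- ===== PORT B =====
def secuenciaADN_alt (secuencia : String) : String :=
  if secuencia.toList.length = 3 ∧ secuencia.toList.all (fun c => c ∈ (['A','C','G','T'] : List Char)) then
    "correcta"
  else
    "Incorrecta"

-- ===== PRECONDITION & SPEC =====
def Spec_secuenciaADN (secuencia : String) (out : String) : Prop := out = secuenciaADN_alt secuencia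
instance (secuencia : String) (out : String) : Decidable (Spec_secuenciaADN secuencia out) := by unfold Spec_secuenciaADN; infer_instance

-- ===== CLAIM (what is proved, stated in full; the proofs are below) =====
def Claim_equal_secuenciaADN : Prop := ∀ (secuencia : String), Dom_secuenciaADN secuencia → Spec_secuenciaADN secuencia (secuenciaADN secuencia)

-- ===== LEMMAS AND PROOFS =====

-- the 64 codons A's loops build, as a literal list
def pvCodons : List (List Char) :=
  [['A','A','A'], ['A','A','C'], ['A','A','G'], ['A','A','T'], ['A','C','A'], ['A','C','C'], ['A','C','G'], ['A','C','T'], ['A','G','A'], ['A','G','C'], ['A','G','G'], ['A','G','T'], ['A','T','A'], ['A','T','C'], ['A','T','G'], ['A','T','T'], ['C','A','A'], ['C','A','C'], ['C','A','G'], ['C','A','T'], ['C','C','A'], ['C','C','C'], ['C','C','G'], ['C','C','T'], ['C','G','A'], ['C','G','C'], ['C','G','G'], ['C','G','T'], ['C','T','A'], ['C','T','C'], ['C','T','G'], ['C','T','T'], ['G','A','A'], ['G','A','C'], ['G','A','G'], ['G','A','T'], ['G','C','A'], ['G','C','C'], ['G','C','G'], ['G','C','T'], ['G','G','A'], ['G','G','C'],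 ['G','G','G'], ['G','G','T'], ['G','T','A'], ['G','T','C'], ['G','T','G'], ['G','T','T'], ['T','A','A'], ['T','A','C'], ['T','A','G'], ['T','A','T'], ['T','C','A'], ['T','C','C'], ['T','C','G'], ['T','C','T'], ['T','G','A'], ['T','G','C'], ['T','G','G'], ['T','G','T'], ['T','T','A'], ['T','T','C'], ['T','T','G'], ['T','T','T']]

theorem pvFold_eq :
    (([['A'], ['C'], ['G'], ['T']] : List (List Char)).foldl (fun acc i =>
      ([['A'], ['C'], ['G'], ['T']] : List (List Char)).foldl (fun acc j =>
        ([['A'], ['C'], ['G'], ['T']] : List (List Char)).foldl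
          (fun acc k => acc ++ [i ++ j ++ k]) acc) acc) []) = pvCodons := by
  decide

theorem pvMem_codons (l : List Char) :
    l ∈ pvCodons ↔ (l.length = 3 ∧ ∀ c ∈ l, c ∈ (['A','C','G','T'] : List Char)) := by
  constructor
  · intro h
    have hall : pvCodons.all
        (fun l => l.length == 3 && l.all (fun c => c ∈ (['A','C','G','T'] : List Char))) = true := by
      decide
    have h2 := List.all_eq_true.mp hall l h
    simp only [Bool.and_eq_true, beq_iff_eq, List.all_eq_true, decide_eq_true_eq] at h2
    exact h2
  · rintro ⟨hlen, hall⟩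
    match l, hlen with
    | [a, b, c], _ =>
      have ha := hall a (by simp)
      have hb := hall b (by simp)
      have hc := hall c (by simp)
      simp only [List.mem_cons, List.not_mem_nil, or_false] at ha hb hc
      rcases ha with rfl | rfl | rfl | rfl <;>
        rcases hb with rfl | rfl | rfl | rfl <;>
          rcases hc with rfl | rfl | rfl | rfl <;> decide

-- ===== VERDICT (by name: the statement is the Claim_ definition above) =====
theorem secuenciaADN_spec : Claim_equal_secuenciaADN := by
  intro s _
  show secuenciaADN s = secuenciaADN_alt s
  unfold secuenciaADN secuenciaADN_alt
  simp only [pvFold_eq]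
  by_cases h : s.toList ∈ pvCodons
  · rw [if_pos h, if_pos]
    rw [pvMem_codons] at h
    exact ⟨h.1, List.all_eq_true.mpr (fun c hc => decide_eq_true (h.2 c hc))⟩
  · rw [if_neg h, if_pos h, if_neg]
    intro ⟨h1, h2⟩
    exact h ((pvMem_codons _).mpr ⟨h1, fun c hc => of_decide_eq_true (List.all_eq_true.mp h2 c hc)⟩)
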